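-- pv_equiv track=rewrite | github.com/aryanoutlaw/AdventofCode2024 | Q3.py | parse_memory_part2
-- ===== SOURCE A (Python) =====
-- def parse_memory_part2(text):
--
--     total = 0
--     i = 0
--     enabled = True
--
--     while i < len(text):
--
--         if i + 2 < len(text) and text[i:i+3] == "do(":
--             if i + 3 < len(text) and text[i+3] == ")":
--                 enabled = True
--                 i += 4
--                 continue
--
--
--         if i + 5 < len(text) and text[i:i+6] == "don't(":
--             if i + 6 < len(text) and text[i+6] == ")":
--                 enabled = False
--                 i += 7
--                 continue
--
--
--         if i + 3 < len(text) and text[i:i+4] == "mul(":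
--             i += 4
--             try:
--                 num1 = ""
--                 while i < len(text) and text[i].isdigit():
--                     num1 += text[i]
--                     i += 1
--
--                 if i < len(text) and text[i] == ",":
--                     i += 1
--                 else:
--                     continue
--
--                 num2 = ""
--                 while i < len(text) and text[i].isdigit():
--                     num2 += text[i]
--                     i += 1
--
--                 if i < len(text) and text[i] == ")":
--                     if num1 and num2 and enabled:
--                         total += int(num1) * int(num2)
--             except:
--                 pass
--         i += 1
--
--     return total
-- ===== SOURCE B (Python) =====
-- def _split_digits(s):
--     """Split s into its leading digit-run and the rest."""
--     for k, ch in enumerate(s):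
--         if not ch.isdigit():
--             return s[:k], s[k:]
--     return s, ""
--
--
-- def parse_memory_part2(text):
--     total = 0
--     enabled = True
--     s = text
--     while True:
--         # jump straight to the nearest token occurrence
--         best = -1
--         for tok in ("do()", "don't()", "mul("):
--             p = s.find(tok)
--             if p != -1 and (best == -1 or p < best):
--                 best = p
--         if best == -1:
--             return total
--         s = s[best:]
--         if s.startswith("do()"):
--             enabled = True
--             s = s[4:]
--         elif s.startswith("don't()"):
--             enabled = False
--             s = s[7:]
--         else:  # s starts with "mul("
--             num1, r = _split_digits(s[4:])
--             if r.startswith(","):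
--                 num2, r2 = _split_digits(r[1:])
--                 if enabled and num1 and num2 and r2.startswith(")"):
--                     total += int(num1) * int(num2)
--                 s = r2[1:]  # move past the char that ended the attempt
--             else:
--                 s = r
-- ===== Notes on version B (the rewrite author's own statement) =====
-- stated objective: faster
-- what changed: B replaces A's per-character while-loop state machine by repeatedly jumping straight to the nearest occurrence of "do()", "don't()" or "mul(" with str.find, slicing off the consumed part, and splitting mul arguments off as leading digit runs.
import Mathlib
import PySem

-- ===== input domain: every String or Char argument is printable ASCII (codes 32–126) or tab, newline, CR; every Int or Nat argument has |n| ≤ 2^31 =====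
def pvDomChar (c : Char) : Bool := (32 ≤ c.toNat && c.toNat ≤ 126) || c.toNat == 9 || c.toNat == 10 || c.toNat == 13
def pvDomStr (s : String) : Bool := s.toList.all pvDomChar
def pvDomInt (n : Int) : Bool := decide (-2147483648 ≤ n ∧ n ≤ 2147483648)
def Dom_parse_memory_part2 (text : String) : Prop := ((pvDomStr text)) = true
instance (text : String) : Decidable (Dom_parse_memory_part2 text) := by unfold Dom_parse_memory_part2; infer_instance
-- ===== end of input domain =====

set_option maxHeartbeats 4000000


-- B replaces A's character-by-character state machine by jumping between token
-- occurrences with str.find and slicing off the consumed part (objective: faster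
-- scan between tokens; exact same return value).

-- ===== PORT A =====
-- A's inner digit loop: num += text[i]; i += 1 while the char is a digit.
def pvScanA : List Char → List Char → List Char × List Char
  | num, [] => (num, [])
  | num, c :: t => if PySem.Chars.isdigit c then pvScanA (num ++ [c]) t else (num, c :: t)

theorem pvScanA_snd_length (num s : List Char) : (pvScanA num s).2.length ≤ s.length := by
  induction s generalizing num with
  | nil => simp [pvScanA]
  | cons c t ih =>
    simp only [pvScanA]
    split
    · exact le_trans (ih _) (Nat.le_succ _)
    · simp

-- small length facts the ports cite for termination (kept omega-free)
theorem pvLenDropLe (l : List Char) (k : Nat) : (l.drop k).length ≤ l.length := by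
  rw [List.length_drop]; exact Nat.sub_le _ _

theorem pvDrop7Le4 (l : List Char) : (l.drop 7).length ≤ (l.drop 4).length := by
  rw [List.length_drop, List.length_drop]
  exact Nat.sub_le_sub_left (by decide) _

theorem pvLtOfLeDrop4 (x m s : List Char) (h1 : x.length ≤ (m.drop 4).length)
    (h2 : m.length ≤ s.length) (h3 : 0 < s.length) : x.length < s.length := by
  have h4 : (m.drop 4).length ≤ s.length - 1 := by
    rw [List.length_drop]
    exact le_trans (Nat.sub_le_sub_right h2 4) (Nat.sub_le_sub_left (by decide) _)
  exact lt_of_le_of_lt (le_trans h1 h4) (Nat.sub_lt h3 (by decide))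

-- A's while loop, rendered as the obvious structural recursion on the remaining
-- suffix (index i ↦ suffix text[i:]); slices/indexing become take/getElem?.
def pvLoopA : List Char → Bool → Int → Int
  | [], _, total => total
  | c :: t, enabled, total =>
    -- if i + 2 < len(text) and text[i:i+3] == "do(":  /  if i + 3 < len and text[i+3] == ")"
    if (2 < (c :: t).length ∧ (c :: t).take 3 = ['d', 'o', '(']) ∧
       (3 < (c :: t).length ∧ (c :: t)[3]? = some ')') then
      pvLoopA ((c :: t).drop 4) true total
    -- if i + 5 < len(text) and text[i:i+6] == "don't(":  /  text[i+6] == ")"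
    else if (5 < (c :: t).length ∧ (c :: t).take 6 = ['d', 'o', 'n', '\'', 't', '(']) ∧
            (6 < (c :: t).length ∧ (c :: t)[6]? = some ')') then
      pvLoopA ((c :: t).drop 7) false total
    -- if i + 3 < len(text) and text[i:i+4] == "mul(":
    else if 3 < (c :: t).length ∧ (c :: t).take 4 = ['m', 'u', 'l', '('] then
      let num1 := (pvScanA [] ((c :: t).drop 4)).1
      let r1 := (pvScanA [] ((c :: t).drop 4)).2
      if 0 < r1.length ∧ r1[0]? = some ',' then
        let num2 := (pvScanA [] (r1.drop 1)).1
        let r3 := (pvScanA [] (r1.drop 1)).2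
        if 0 < r3.length ∧ r3[0]? = some ')' then
          -- add, then the trailing i += 1 consumes the ')'
          pvLoopA (r3.drop 1) enabled
            (if num1 ≠ [] ∧ num2 ≠ [] ∧ enabled = true then
               total + ((PySem.Int.ofStr? (String.ofList num1)).getD 0) *
                       ((PySem.Int.ofStr? (String.ofList num2)).getD 0)
             else total)
        else
          -- no ')' here: the trailing i += 1 skips this char
          pvLoopA (r3.drop 1) enabled total
      else
        -- no ',' after the digits: continue at the current position
        pvLoopA r1 enabled total
    else
      pvLoopA ((c :: t).drop 1) enabled total
  termination_by s _ _ => s.length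
  decreasing_by
  all_goals first
  | exact pvLtOfLeDrop4 _ (c :: t) (c :: t) (le_refl _) (le_refl _) (Nat.succ_pos _)
  | exact pvLtOfLeDrop4 _ (c :: t) (c :: t) (pvDrop7Le4 _) (le_refl _) (Nat.succ_pos _)
  | exact pvLtOfLeDrop4 _ (c :: t) (c :: t)
      (le_trans (pvLenDropLe _ 1) (le_trans (pvScanA_snd_length _ _)
        (le_trans (pvLenDropLe _ 1) (pvScanA_snd_length _ _))))
      (le_refl _) (Nat.succ_pos _)
  | exact pvLtOfLeDrop4 _ (c :: t) (c :: t) (pvScanA_snd_length _ _) (le_refl _) (Nat.succ_pos _)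
  | exact Nat.lt_succ_self t.length

def parse_memory_part2 (text : String) : Int :=
  pvLoopA text.toList true 0

-- ===== PORT B =====
def pvTokDo : List Char := ['d', 'o', '(', ')']
def pvTokDont : List Char := ['d', 'o', 'n', '\'', 't', '(', ')']
def pvTokMul : List Char := ['m', 'u', 'l', '(']

-- Source B: best = -1; for tok in (...): p = s.find(tok); if p != -1 and (best == -1 or p < best): best = p
def pvBestFind (s : List Char) : Int :=
  [pvTokDo, pvTokDont, pvTokMul].foldl
    (fun best tok =>
      if PySem.Chars.find s tok ≠ -1 ∧ (best = -1 ∨ PySem.Chars.find s tok < best) then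
        PySem.Chars.find s tok
      else best)
    (-1)

-- Facts about pvBestFind the port needs for termination (and the proofs reuse):
-- when ≠ -1 it is a nonnegative minimum of the three successful finds.
-- Source B's _split_digits: split off the leading digit run.
def pvSplitDigits : List Char → List Char × List Char
  | [] => ([], [])
  | c :: t =>
    if PySem.Chars.isdigit c then
      let p := pvSplitDigits t
      (c :: p.1, p.2)
    else ([], c :: t)

theorem pvSplitDigits_snd_length (s : List Char) : (pvSplitDigits s).2.length ≤ s.length := by
  induction s with
  | nil => simp [pvSplitDigits]
  | cons c t ih =>
    simp only [pvSplitDigits]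
    split
    · exact le_trans ih (Nat.le_succ _)
    · simp

-- the port cites this for termination: a successful find needs a nonempty string
theorem pvBestFind_pos (s : List Char) (hb : pvBestFind s ≠ -1) : 0 < s.length := by
  cases s with
  | nil => exact absurd (by decide) hb
  | cons c t => exact Nat.succ_pos _

-- Source B's while True loop: jump to the nearest token, handle it, slice it off.
def pvLoopB (s : List Char) (enabled : Bool) (total : Int) : Int :=
  if hb : pvBestFind s = -1 then total
  else
    let s' := s.drop (pvBestFind s).toNat
    if PySem.Chars.startswith s' pvTokDo then
      pvLoopB (s'.drop 4) true total
    else if PySem.Chars.startswith s' pvTokDont then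
      pvLoopB (s'.drop 7) false total
    else  -- s' starts with "mul("
      let num1 := (pvSplitDigits (s'.drop 4)).1
      let r := (pvSplitDigits (s'.drop 4)).2
      if PySem.Chars.startswith r [','] then
        let num2 := (pvSplitDigits (r.drop 1)).1
        let r2 := (pvSplitDigits (r.drop 1)).2
        pvLoopB (r2.drop 1) enabled
          (if enabled = true ∧ num1 ≠ [] ∧ num2 ≠ [] ∧ PySem.Chars.startswith r2 [')'] then
             total + ((PySem.Int.ofStr? (String.ofList num1)).getD 0) *
                     ((PySem.Int.ofStr? (String.ofList num2)).getD 0)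
           else total)
      else
        pvLoopB r enabled total
  termination_by s.length
  decreasing_by
  all_goals first
  | exact pvLtOfLeDrop4 _ (s.drop (pvBestFind s).toNat) s (le_refl _)
      (pvLenDropLe _ _) (pvBestFind_pos s hb)
  | exact pvLtOfLeDrop4 _ (s.drop (pvBestFind s).toNat) s (pvDrop7Le4 _)
      (pvLenDropLe _ _) (pvBestFind_pos s hb)
  | exact pvLtOfLeDrop4 _ (s.drop (pvBestFind s).toNat) s
      (le_trans (pvLenDropLe _ 1) (le_trans (pvSplitDigits_snd_length _)
        (le_trans (pvLenDropLe _ 1) (pvSplitDigits_snd_length _))))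
      (pvLenDropLe _ _) (pvBestFind_pos s hb)
  | exact pvLtOfLeDrop4 _ (s.drop (pvBestFind s).toNat) s (pvSplitDigits_snd_length _)
      (pvLenDropLe _ _) (pvBestFind_pos s hb)

def parse_memory_part2_alt (text : String) : Int :=
  pvLoopB text.toList true 0

-- ===== PRECONDITION & SPEC =====
def Spec_parse_memory_part2 (text : String) (out : Int) : Prop := out = parse_memory_part2_alt text
instance (text : String) (out : Int) : Decidable (Spec_parse_memory_part2 text out) := by unfold Spec_parse_memory_part2; infer_instance

-- ===== CLAIM (what is proved, stated in full; the proofs are below) =====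
def Claim_equal_parse_memory_part2 : Prop := ∀ (text : String), Dom_parse_memory_part2 text → Spec_parse_memory_part2 text (parse_memory_part2 text)

-- ===== LEMMAS AND PROOFS =====

-- proof helper: one step of the best-of-three fold in pvBestFind
def pvF (best p : Int) : Int := if p ≠ -1 ∧ (best = -1 ∨ p < best) then p else best

theorem pvF_step (best p : Int) (hb : -1 ≤ best) (hp : -1 ≤ p) :
    (pvF best p = -1 → (best = -1 ∧ p = -1)) ∧ (-1 ≤ pvF best p) ∧
    (pvF best p = best ∨ pvF best p = p) ∧
    (best ≠ -1 → pvF best p ≤ best) ∧ (p ≠ -1 → pvF best p ≤ p) := by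
  unfold pvF; split_ifs with h <;> omega

theorem pvBestFind_min (s : List Char) :
    (pvBestFind s = -1 ∧ PySem.Chars.find s pvTokDo = -1 ∧ PySem.Chars.find s pvTokDont = -1 ∧
      PySem.Chars.find s pvTokMul = -1) ∨
    (0 ≤ pvBestFind s ∧
      (pvBestFind s = PySem.Chars.find s pvTokDo ∨ pvBestFind s = PySem.Chars.find s pvTokDont ∨
        pvBestFind s = PySem.Chars.find s pvTokMul) ∧
      (PySem.Chars.find s pvTokDo ≠ -1 → pvBestFind s ≤ PySem.Chars.find s pvTokDo) ∧
      (PySem.Chars.find s pvTokDont ≠ -1 → pvBestFind s ≤ PySem.Chars.find s pvTokDont) ∧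
      (PySem.Chars.find s pvTokMul ≠ -1 → pvBestFind s ≤ PySem.Chars.find s pvTokMul)) := by
  have n1 := PySem.Chars.neg_one_le_find s pvTokDo
  have n2 := PySem.Chars.neg_one_le_find s pvTokDont
  have n3 := PySem.Chars.neg_one_le_find s pvTokMul
  have e : pvBestFind s =
      pvF (pvF (pvF (-1) (PySem.Chars.find s pvTokDo)) (PySem.Chars.find s pvTokDont))
        (PySem.Chars.find s pvTokMul) := rfl
  have s1 := pvF_step (-1) (PySem.Chars.find s pvTokDo) (by omega) n1
  have s2 := pvF_step _ (PySem.Chars.find s pvTokDont) s1.2.1 n2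
  have s3 := pvF_step _ (PySem.Chars.find s pvTokMul) s2.2.1 n3
  rw [e]
  omega

theorem pvBestFind_ge4 (s : List Char) (h : pvBestFind s ≠ -1) :
    0 ≤ pvBestFind s ∧ 4 ≤ (s.drop (pvBestFind s).toNat).length := by
  rcases pvBestFind_min s with ⟨h1, _⟩ | ⟨hpos, heq, _⟩
  · exact absurd h1 h
  · refine ⟨hpos, ?_⟩
    have hdl : (s.drop (pvBestFind s).toNat).length = s.length - (pvBestFind s).toNat := by simp
    rcases heq with he | he | he
    · have hsp := (PySem.Chars.find_spec (he ▸ hpos)).1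
      have hle := hsp.length_le
      have hl4 : pvTokDo.length = 4 := rfl
      rw [← he] at hle
      omega
    · have hsp := (PySem.Chars.find_spec (he ▸ hpos)).1
      have hle := hsp.length_le
      have hl4 : pvTokDont.length = 7 := rfl
      rw [← he] at hle
      omega
    · have hsp := (PySem.Chars.find_spec (he ▸ hpos)).1
      have hle := hsp.length_le
      have hl4 : pvTokMul.length = 4 := rfl
      rw [← he] at hle
      omega

-- "some token starts here"
def pvTokAt (s : List Char) : Prop := pvTokDo <+: s ∨ pvTokDont <+: s ∨ pvTokMul <+: s

theorem pvStartswith_single (u : List Char) (x : Char) :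
    PySem.Chars.startswith u [x] = true ↔ (0 < u.length ∧ u[0]? = some x) := by
  rw [PySem.Chars.startswith_iff]
  cases u with
  | nil => simp
  | cons c t => simp [List.cons_prefix_cons]; tauto

theorem pvLoopA_skip (c : Char) (t : List Char) (enabled : Bool) (total : Int)
    (h : ¬ pvTokAt (c :: t)) : pvLoopA (c :: t) enabled total = pvLoopA t enabled total := by
  have hg1 : ¬ ((2 < (c :: t).length ∧ (c :: t).take 3 = ['d', 'o', '(']) ∧
      (3 < (c :: t).length ∧ (c :: t)[3]? = some ')')) := by
    rintro ⟨⟨hl, ht3⟩, hl3, hg⟩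
    have h4 : (c :: t).take 4 = pvTokDo := by
      rw [List.take_add_one, ht3, hg]; rfl
    exact h (Or.inl (h4 ▸ List.take_prefix 4 (c :: t)))
  have hg2 : ¬ ((5 < (c :: t).length ∧ (c :: t).take 6 = ['d', 'o', 'n', '\'', 't', '(']) ∧
      (6 < (c :: t).length ∧ (c :: t)[6]? = some ')')) := by
    rintro ⟨⟨hl, ht6⟩, hl6, hg⟩
    have h7 : (c :: t).take 7 = pvTokDont := by
      rw [List.take_add_one, ht6, hg]; rfl
    exact h (Or.inr (Or.inl (h7 ▸ List.take_prefix 7 (c :: t))))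
  have hg3 : ¬ (3 < (c :: t).length ∧ (c :: t).take 4 = ['m', 'u', 'l', '(']) := by
    rintro ⟨hl, ht4⟩
    have h4 : (c :: t).take 4 = pvTokMul := ht4
    exact h (Or.inr (Or.inr (h4 ▸ List.take_prefix 4 (c :: t))))
  rw [pvLoopA, if_neg hg1, if_neg hg2, if_neg hg3]
  rfl

theorem pvLoopA_walk (k : Nat) (s : List Char) (enabled : Bool) (total : Int)
    (h : ∀ j < k, ¬ pvTokAt (s.drop j)) :
    pvLoopA s enabled total = pvLoopA (s.drop k) enabled total := by
  induction k generalizing s with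
  | zero => simp
  | succ k ih =>
    cases s with
    | nil => simp
    | cons c t =>
      have h0 : ¬ pvTokAt (c :: t) := by simpa using h 0 (by omega)
      rw [pvLoopA_skip c t enabled total h0, List.drop_succ_cons]
      exact ih t (fun j hj => by simpa using h (j + 1) (by omega))

theorem pvScanA_eq (num s : List Char) :
    pvScanA num s = (num ++ s.takeWhile PySem.Chars.isdigit, s.dropWhile PySem.Chars.isdigit) := by
  induction s generalizing num with
  | nil => simp [pvScanA]
  | cons c t ih =>
    by_cases hd : PySem.Chars.isdigit c
    · simp [pvScanA, hd, ih]
    · simp [pvScanA, hd]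

theorem pvSplitDigits_eq (s : List Char) :
    pvSplitDigits s = (s.takeWhile PySem.Chars.isdigit, s.dropWhile PySem.Chars.isdigit) := by
  induction s with
  | nil => simp [pvSplitDigits]
  | cons c t ih =>
    by_cases hd : PySem.Chars.isdigit c
    · simp [pvSplitDigits, hd, ih]
    · simp [pvSplitDigits, hd]

-- a token prefix somewhere is an infix, so the corresponding find succeeds
theorem pvFind_ne_of_prefix (s tok : List Char) (j : Nat) (hp : tok <+: s.drop j) :
    PySem.Chars.find s tok ≠ -1 := by
  rw [Ne, PySem.Chars.find_eq_neg_one_iff]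
  intro hni
  exact hni ((PySem.Chars.isIn_iff_infix tok s).mp
    ((PySem.Chars.exists_prefix_drop_iff_isIn tok s).mp ⟨j, hp⟩))

theorem pvLoop_eq (n : Nat) : ∀ (s : List Char), s.length ≤ n → ∀ (enabled : Bool) (total : Int),
    pvLoopB s enabled total = pvLoopA s enabled total := by
  induction n with
  | zero =>
    intro s hs enabled total
    have hs0 : s = [] := List.eq_nil_of_length_eq_zero (Nat.le_zero.mp hs)
    subst hs0
    rw [pvLoopB, dif_pos (show pvBestFind [] = -1 by decide)]
    simp [pvLoopA]
  | succ n ih =>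
    intro s hs enabled total
    by_cases hb : pvBestFind s = -1
    · rw [pvLoopB, dif_pos hb]
      rcases pvBestFind_min s with ⟨_, f1, f2, f3⟩ | ⟨hpos, _⟩
      · have hnone : ∀ j, ¬ pvTokAt (s.drop j) := by
          intro j ht
          rcases ht with hp | hp | hp
          · exact pvFind_ne_of_prefix s pvTokDo j hp f1
          · exact pvFind_ne_of_prefix s pvTokDont j hp f2
          · exact pvFind_ne_of_prefix s pvTokMul j hp f3
        rw [pvLoopA_walk s.length s enabled total (fun j _ => hnone j)]
        simp [List.drop_length, pvLoopA]
      · omega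
    · obtain ⟨hpos, hge⟩ := pvBestFind_ge4 s hb
      rcases pvBestFind_min s with ⟨h1, _⟩ | ⟨_, heq, hm1, hm2, hm3⟩
      · exact absurd h1 hb
      have hmin : ∀ j < (pvBestFind s).toNat, ¬ pvTokAt (s.drop j) := by
        intro j hj ht
        rcases ht with hp | hp | hp
        · have hne := pvFind_ne_of_prefix s pvTokDo j hp
          have hle := hm1 hne
          have hnn := PySem.Chars.neg_one_le_find s pvTokDo
          exact ((PySem.Chars.find_spec (show (0:Int) ≤ _ by omega)).2 j (by omega)) hp
        · have hne := pvFind_ne_of_prefix s pvTokDont j hp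
          have hle := hm2 hne
          have hnn := PySem.Chars.neg_one_le_find s pvTokDont
          exact ((PySem.Chars.find_spec (show (0:Int) ≤ _ by omega)).2 j (by omega)) hp
        · have hne := pvFind_ne_of_prefix s pvTokMul j hp
          have hle := hm3 hne
          have hnn := PySem.Chars.neg_one_le_find s pvTokMul
          exact ((PySem.Chars.find_spec (show (0:Int) ≤ _ by omega)).2 j (by omega)) hp
      have htok : pvTokAt (s.drop (pvBestFind s).toNat) := by
        rcases heq with he | he | he
        · exact Or.inl (by rw [he]; exact (PySem.Chars.find_spec (he ▸ hpos)).1)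
        · exact Or.inr (Or.inl (by rw [he]; exact (PySem.Chars.find_spec (he ▸ hpos)).1))
        · exact Or.inr (Or.inr (by rw [he]; exact (PySem.Chars.find_spec (he ▸ hpos)).1))
      have hds : (s.drop (pvBestFind s).toNat).length ≤ s.length := by simp
      rw [pvLoopA_walk (pvBestFind s).toNat s enabled total hmin, pvLoopB, dif_neg hb]
      rcases htok with hp | hp | hp
      · -- "do()" at the jump target
        obtain ⟨u, hu⟩ := hp
        have hu' : s.drop (pvBestFind s).toNat = 'd' :: 'o' :: '(' :: ')' :: u := hu.symm
        have hlen : (s.drop (pvBestFind s).toNat).length = u.length + 4 := by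
          rw [hu']; simp
        have hul : u.length + 4 ≤ s.length := by omega
        have hsw : PySem.Chars.startswith ('d' :: 'o' :: '(' :: ')' :: u) pvTokDo = true := by
          rw [PySem.Chars.startswith_iff]; exact ⟨u, rfl⟩
        rw [hu']
        simp only [eq_true hsw, if_true]
        have hg1 : (2 < ('d' :: 'o' :: '(' :: ')' :: u).length ∧
              ('d' :: 'o' :: '(' :: ')' :: u).take 3 = ['d', 'o', '(']) ∧
            (3 < ('d' :: 'o' :: '(' :: ')' :: u).length ∧
              ('d' :: 'o' :: '(' :: ')' :: u)[3]? = some ')') := by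
          refine ⟨⟨?_, rfl⟩, ?_, rfl⟩ <;> (simp only [List.length_cons]; omega)
        rw [pvLoopA]
        simp only [eq_true hg1, if_true]
        simp only [List.drop_succ_cons, List.drop_zero]
        exact ih u (by omega) true total
      · -- "don't()" at the jump target
        obtain ⟨u, hu⟩ := hp
        have hu' : s.drop (pvBestFind s).toNat = 'd' :: 'o' :: 'n' :: '\'' :: 't' :: '(' :: ')' :: u := hu.symm
        have hlen : (s.drop (pvBestFind s).toNat).length = u.length + 7 := by
          rw [hu']; simp
        have hul : u.length + 7 ≤ s.length := by omega
        have hnsw1 : ¬ (PySem.Chars.startswith ('d' :: 'o' :: 'n' :: '\'' :: 't' :: '(' :: ')' :: u)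
            pvTokDo = true) := by
          rw [PySem.Chars.startswith_iff]
          rintro ⟨v, hv⟩
          simp [pvTokDo] at hv
        have hsw2 : PySem.Chars.startswith ('d' :: 'o' :: 'n' :: '\'' :: 't' :: '(' :: ')' :: u)
            pvTokDont = true := by
          rw [PySem.Chars.startswith_iff]; exact ⟨u, rfl⟩
        rw [hu']
        simp only [eq_false hnsw1, eq_true hsw2, if_true, if_false]
        have hng1 : ¬ ((2 < ('d' :: 'o' :: 'n' :: '\'' :: 't' :: '(' :: ')' :: u).length ∧
              ('d' :: 'o' :: 'n' :: '\'' :: 't' :: '(' :: ')' :: u).take 3 = ['d', 'o', '(']) ∧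
            (3 < ('d' :: 'o' :: 'n' :: '\'' :: 't' :: '(' :: ')' :: u).length ∧
              ('d' :: 'o' :: 'n' :: '\'' :: 't' :: '(' :: ')' :: u)[3]? = some ')')) := by
          rintro ⟨⟨-, h3⟩, -⟩
          simp at h3
        have hg2 : (5 < ('d' :: 'o' :: 'n' :: '\'' :: 't' :: '(' :: ')' :: u).length ∧
              ('d' :: 'o' :: 'n' :: '\'' :: 't' :: '(' :: ')' :: u).take 6 =
                ['d', 'o', 'n', '\'', 't', '(']) ∧
            (6 < ('d' :: 'o' :: 'n' :: '\'' :: 't' :: '(' :: ')' :: u).length ∧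
              ('d' :: 'o' :: 'n' :: '\'' :: 't' :: '(' :: ')' :: u)[6]? = some ')') := by
          refine ⟨⟨?_, rfl⟩, ?_, rfl⟩ <;> (simp only [List.length_cons]; omega)
        rw [pvLoopA]
        simp only [eq_false hng1, eq_true hg2, if_true, if_false]
        simp only [List.drop_succ_cons, List.drop_zero]
        exact ih u (by omega) false total
      · -- "mul(" at the jump target
        obtain ⟨u, hu⟩ := hp
        have hu' : s.drop (pvBestFind s).toNat = 'm' :: 'u' :: 'l' :: '(' :: u := hu.symm
        have hlen : (s.drop (pvBestFind s).toNat).length = u.length + 4 := by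
          rw [hu']; simp
        have hul : u.length + 4 ≤ s.length := by omega
        have hnsw1 : ¬ (PySem.Chars.startswith ('m' :: 'u' :: 'l' :: '(' :: u) pvTokDo = true) := by
          rw [PySem.Chars.startswith_iff]
          rintro ⟨v, hv⟩
          simp [pvTokDo] at hv
        have hnsw2 : ¬ (PySem.Chars.startswith ('m' :: 'u' :: 'l' :: '(' :: u) pvTokDont = true) := by
          rw [PySem.Chars.startswith_iff]
          rintro ⟨v, hv⟩
          simp [pvTokDont] at hv
        rw [hu']
        simp only [eq_false hnsw1, eq_false hnsw2, if_false]
        have hng1 : ¬ ((2 < ('m' :: 'u' :: 'l' :: '(' :: u).length ∧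
              ('m' :: 'u' :: 'l' :: '(' :: u).take 3 = ['d', 'o', '(']) ∧
            (3 < ('m' :: 'u' :: 'l' :: '(' :: u).length ∧
              ('m' :: 'u' :: 'l' :: '(' :: u)[3]? = some ')')) := by
          rintro ⟨⟨-, h3⟩, -⟩
          simp at h3
        have hng2 : ¬ ((5 < ('m' :: 'u' :: 'l' :: '(' :: u).length ∧
              ('m' :: 'u' :: 'l' :: '(' :: u).take 6 = ['d', 'o', 'n', '\'', 't', '(']) ∧
            (6 < ('m' :: 'u' :: 'l' :: '(' :: u).length ∧
              ('m' :: 'u' :: 'l' :: '(' :: u)[6]? = some ')')) := by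
          rintro ⟨⟨-, h6⟩, -⟩
          simp at h6
        have hg3 : 3 < ('m' :: 'u' :: 'l' :: '(' :: u).length ∧
            ('m' :: 'u' :: 'l' :: '(' :: u).take 4 = ['m', 'u', 'l', '('] := by
          exact ⟨by simp only [List.length_cons]; omega, rfl⟩
        rw [pvLoopA]
        simp only [eq_false hng1, eq_false hng2, eq_true hg3, if_true, if_false]
        simp only [List.drop_succ_cons, List.drop_zero, pvScanA_eq, pvSplitDigits_eq,
          List.nil_append]
        have hr1 : (u.dropWhile PySem.Chars.isdigit).length ≤ u.length :=
          List.length_dropWhile_le _ _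
        by_cases hc : 0 < (u.dropWhile PySem.Chars.isdigit).length ∧
            (u.dropWhile PySem.Chars.isdigit)[0]? = some ','
        · have hswc : PySem.Chars.startswith (u.dropWhile PySem.Chars.isdigit) [','] = true :=
            (pvStartswith_single _ _).mpr hc
          simp only [eq_true hswc, eq_true hc, if_true]
          have hr3 : (((u.dropWhile PySem.Chars.isdigit).drop 1).dropWhile
              PySem.Chars.isdigit).length ≤ u.length := by
            have h1 := List.length_dropWhile_le PySem.Chars.isdigit
              ((u.dropWhile PySem.Chars.isdigit).drop 1)
            simp only [List.length_drop] at h1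
            omega
          have hlen3 : ((((u.dropWhile PySem.Chars.isdigit).drop 1).dropWhile
              PySem.Chars.isdigit).drop 1).length ≤ n := by
            simp only [List.length_drop]
            omega
          by_cases hpcl : 0 < (((u.dropWhile PySem.Chars.isdigit).drop 1).dropWhile
              PySem.Chars.isdigit).length ∧
              (((u.dropWhile PySem.Chars.isdigit).drop 1).dropWhile
                PySem.Chars.isdigit)[0]? = some ')'
          · have hswp : PySem.Chars.startswith (((u.dropWhile PySem.Chars.isdigit).drop 1).dropWhile
                PySem.Chars.isdigit) [')'] = true := (pvStartswith_single _ _).mpr hpcl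
            simp only [eq_true hpcl, if_true]
            have hcond : (if enabled = true ∧ u.takeWhile PySem.Chars.isdigit ≠ [] ∧
                  ((u.dropWhile PySem.Chars.isdigit).drop 1).takeWhile PySem.Chars.isdigit ≠ [] ∧
                  PySem.Chars.startswith (((u.dropWhile PySem.Chars.isdigit).drop 1).dropWhile
                    PySem.Chars.isdigit) [')'] = true then
                total + ((PySem.Int.ofStr? (String.ofList (u.takeWhile PySem.Chars.isdigit))).getD 0) *
                  ((PySem.Int.ofStr? (String.ofList (((u.dropWhile PySem.Chars.isdigit).drop 1).takeWhile
                    PySem.Chars.isdigit))).getD 0)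
              else total) =
                (if u.takeWhile PySem.Chars.isdigit ≠ [] ∧
                  ((u.dropWhile PySem.Chars.isdigit).drop 1).takeWhile PySem.Chars.isdigit ≠ [] ∧
                  enabled = true then
                total + ((PySem.Int.ofStr? (String.ofList (u.takeWhile PySem.Chars.isdigit))).getD 0) *
                  ((PySem.Int.ofStr? (String.ofList (((u.dropWhile PySem.Chars.isdigit).drop 1).takeWhile
                    PySem.Chars.isdigit))).getD 0)
              else total) := by
              by_cases hadd : u.takeWhile PySem.Chars.isdigit ≠ [] ∧
                  ((u.dropWhile PySem.Chars.isdigit).drop 1).takeWhile PySem.Chars.isdigit ≠ [] ∧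
                  enabled = true
              · have haddB : enabled = true ∧ u.takeWhile PySem.Chars.isdigit ≠ [] ∧
                    ((u.dropWhile PySem.Chars.isdigit).drop 1).takeWhile PySem.Chars.isdigit ≠ [] ∧
                    PySem.Chars.startswith (((u.dropWhile PySem.Chars.isdigit).drop 1).dropWhile
                      PySem.Chars.isdigit) [')'] = true := ⟨hadd.2.2, hadd.1, hadd.2.1, hswp⟩
                simp only [eq_true hadd, eq_true haddB, if_true]
              · have hnaddB : ¬ (enabled = true ∧ u.takeWhile PySem.Chars.isdigit ≠ [] ∧
                    ((u.dropWhile PySem.Chars.isdigit).drop 1).takeWhile PySem.Chars.isdigit ≠ [] ∧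
                    PySem.Chars.startswith (((u.dropWhile PySem.Chars.isdigit).drop 1).dropWhile
                      PySem.Chars.isdigit) [')'] = true) :=
                  fun h => hadd ⟨h.2.1, h.2.2.1, h.1⟩
                simp only [eq_false hadd, eq_false hnaddB, if_false]
            rw [hcond]
            exact ih _ hlen3 enabled _
          · have hswp2 : ¬ (PySem.Chars.startswith (((u.dropWhile PySem.Chars.isdigit).drop 1).dropWhile
                PySem.Chars.isdigit) [')'] = true) := by
              intro hT
              exact hpcl ((pvStartswith_single _ _).mp hT)
            have hnaddB : ¬ (enabled = true ∧ u.takeWhile PySem.Chars.isdigit ≠ [] ∧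
                ((u.dropWhile PySem.Chars.isdigit).drop 1).takeWhile PySem.Chars.isdigit ≠ [] ∧
                PySem.Chars.startswith (((u.dropWhile PySem.Chars.isdigit).drop 1).dropWhile
                  PySem.Chars.isdigit) [')'] = true) :=
              fun h => hswp2 h.2.2.2
            simp only [eq_false hpcl, eq_false hnaddB, if_false]
            exact ih _ hlen3 enabled total
        · have hnswc : ¬ (PySem.Chars.startswith (u.dropWhile PySem.Chars.isdigit) [','] = true) := by
            intro hT
            exact hc ((pvStartswith_single _ _).mp hT)
          simp only [eq_false hnswc, eq_false hc, if_false]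
          have hlenr : (u.dropWhile PySem.Chars.isdigit).length ≤ n := by omega
          exact ih _ hlenr enabled total

-- ===== VERDICT (by name: the statement is the Claim_ definition above) =====
theorem parse_memory_part2_spec : Claim_equal_parse_memory_part2 := by
  intro text _
  unfold Spec_parse_memory_part2 parse_memory_part2 parse_memory_part2_alt
  exact (pvLoop_eq text.toList.length text.toList le_rfl true 0).symm
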